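-- pv_equiv track=rewrite | github.com/raufbiswas/BRACU_CSE | CSE220 Data Structures/LAB/Lab7 - Hashing and Collision Resolve/solveLab07.py/task01.py | nerdy_run
-- ===== SOURCE A (Python) =====
-- def nerdy_run(path,k):
--   dup= {}
--   for i in range(len(path)):
--     if path[i] in dup and ((i-dup[path[i]]) <= k):
--       return path[i]
--     else:
--       dup[path[i]] = i
--   return None
-- ===== SOURCE B (Python) =====
-- def nerdy_run(path, k):
--     for i, x in enumerate(path):
--         if x in path[max(0, i - k):i]:
--             return x
--     return None
-- ===== Notes on version B (the rewrite author's own statement) =====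
-- stated objective: simpler
-- what changed: Replaces the incrementally built last-index dict with a direct windowed scan: for each position i, test membership of path[i] in the slice of the previous min(i,k) elements; no auxiliary index structure is kept.
import Mathlib
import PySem

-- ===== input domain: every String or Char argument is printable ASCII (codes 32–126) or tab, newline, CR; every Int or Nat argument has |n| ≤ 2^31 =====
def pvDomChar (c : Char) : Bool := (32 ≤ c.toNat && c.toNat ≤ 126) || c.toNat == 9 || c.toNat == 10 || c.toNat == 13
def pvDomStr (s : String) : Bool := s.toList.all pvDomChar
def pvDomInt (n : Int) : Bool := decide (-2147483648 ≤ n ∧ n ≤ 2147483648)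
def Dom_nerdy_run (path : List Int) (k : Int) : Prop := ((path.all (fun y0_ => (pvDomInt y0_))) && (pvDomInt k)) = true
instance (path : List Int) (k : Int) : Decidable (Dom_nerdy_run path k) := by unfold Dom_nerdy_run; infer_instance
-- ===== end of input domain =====

-- B replaces A's last-index dict with a direct membership scan of the previous-k window slice (simpler; no speedup claimed).


-- ===== PORT A =====
-- A iterates i over range(len(path)) reading path[i] (always in range); ported as a
-- recursion over the remaining suffix carrying the index i and the dict `dup`.
def nerdyAgo (k : Int) : List Int → Nat → PySem.Dict Int Int → Option Int
  | [], _, _ => none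
  | x :: rest, i, dup =>
    match dup.get? x with
    | some j => if (i : Int) - j ≤ k then some x else nerdyAgo k rest (i + 1) (dup.insert x (i : Int))
    | none => nerdyAgo k rest (i + 1) (dup.insert x (i : Int))

def nerdy_run (path : List Int) (k : Int) : Option Int :=
  nerdyAgo k path 0 PySem.Dict.empty

-- ===== PORT B =====
-- B: for i, x in enumerate(path): if x in path[max(0, i-k):i]: return x
def nerdyBgo (path : List Int) (k : Int) : List Int → Nat → Option Int
  | [], _ => none
  | x :: rest, i =>
    if x ∈ PySem.List.slice path (some (max 0 ((i : Int) - k))) (some (i : Int)) then some x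
    else nerdyBgo path k rest (i + 1)

def nerdy_run_alt (path : List Int) (k : Int) : Option Int :=
  nerdyBgo path k path 0

-- ===== PRECONDITION & SPEC =====
def Spec_nerdy_run (path : List Int) (k : Int) (out : Option Int) : Prop := out = nerdy_run_alt path k
instance (path : List Int) (k : Int) (out : Option Int) : Decidable (Spec_nerdy_run path k out) := by unfold Spec_nerdy_run; infer_instance

-- ===== CLAIM (what is proved, stated in full; the proofs are below) =====
def Claim_equal_nerdy_run : Prop := ∀ (path : List Int) (k : Int), Dom_nerdy_run path k → Spec_nerdy_run path k (nerdy_run path k)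

-- ===== LEMMAS AND PROOFS =====

-- index of the last occurrence of x in l (none if absent)
def lastIdx : List Int → Int → Option Nat
  | [], _ => none
  | y :: t, x =>
    match lastIdx t x with
    | some j => some (j + 1)
    | none => if y = x then some 0 else none

theorem lastIdx_none_iff (l : List Int) (x : Int) : lastIdx l x = none ↔ x ∉ l := by
  induction l with
  | nil => simp [lastIdx]
  | cons y t ih =>
    simp only [lastIdx, List.mem_cons]
    cases h : lastIdx t x with
    | some j =>
      simp only [h] at ih ⊢
      simp at ih ⊢
      tauto
    | none =>
      simp only [h] at ih ⊢
      by_cases hy : y = x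
      · simp [hy]
      · simp [hy]
        tauto

theorem lastIdx_some (l : List Int) (x : Int) (j : Nat) (h : lastIdx l x = some j) :
    ∃ hj : j < l.length, l[j] = x ∧ ∀ j', j < j' → (hj' : j' < l.length) → l[j'] ≠ x := by
  induction l generalizing j with
  | nil => simp [lastIdx] at h
  | cons y t ih =>
    simp only [lastIdx] at h
    cases ht : lastIdx t x with
    | some j0 =>
      rw [ht] at h
      obtain rfl : j = j0 + 1 := by simpa using h.symm
      obtain ⟨hj0, hx, hmax⟩ := ih j0 ht
      refine ⟨by simpa using Nat.succ_lt_succ hj0, by simpa using hx, ?_⟩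
      intro j' hgt hj' hx'
      cases j' with
      | zero => omega
      | succ m => exact hmax m (by omega) (by simpa using hj') (by simpa using hx')
    | none =>
      rw [ht] at h
      by_cases hy : y = x
      · simp [hy] at h
        obtain rfl : j = 0 := h.symm
        refine ⟨by simp, by simpa using hy, ?_⟩
        intro j' hgt hj' hx'
        cases j' with
        | zero => omega
        | succ m =>
          have hm : m < t.length := by simpa using hj'
          have hmx : t[m] = x := by simpa using hx'
          exact ((lastIdx_none_iff t x).mp ht) (hmx ▸ List.getElem_mem hm)
      · simp [hy] at h

theorem lastIdx_append_singleton (l : List Int) (x y : Int) :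
    lastIdx (l ++ [x]) y = if y = x then some l.length else lastIdx l y := by
  induction l with
  | nil =>
    by_cases h : y = x
    · simp [lastIdx, h]
    · simp [lastIdx, h, Ne.symm h]
  | cons z t ih =>
    simp only [List.cons_append, lastIdx, ih]
    by_cases h : y = x
    · simp [h]
    · simp [h]

-- membership in a drop, index form
theorem mem_drop_iff (l : List Int) (m : Nat) (x : Int) :
    x ∈ l.drop m ↔ ∃ j, m ≤ j ∧ ∃ hj : j < l.length, l[j] = x := by
  constructor
  · intro h
    obtain ⟨t, ht, hx⟩ := List.mem_iff_getElem.mp h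
    refine ⟨m + t, by omega, by simp at ht; omega, ?_⟩
    simpa using hx
  · rintro ⟨j, hm, hj, hx⟩
    refine List.mem_iff_getElem.mpr ⟨j - m, by simp; omega, ?_⟩
    rw [List.getElem_drop]
    simpa [Nat.add_sub_cancel' hm] using hx

-- B's slice at position pre.length of path = pre ++ suf IS a suffix of pre
theorem slice_test (pre suf : List Int) (k : Int) :
    PySem.List.slice (pre ++ suf) (some (max 0 ((pre.length : Int) - k))) (some ((pre.length : Int)))
      = pre.drop (max 0 ((pre.length : Int) - k)).toNat := by
  set a : Int := max 0 ((pre.length : Int) - k) with ha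
  have h0 : 0 ≤ a := le_max_left _ _
  rw [PySem.List.slice_toNat _ h0 (by positivity)]
  by_cases hle : a.toNat ≤ pre.length
  · rw [List.drop_append_of_le_length hle]
    have hlen : (pre.length : Int).toNat - a.toNat = (pre.drop a.toNat).length := by
      simp
    rw [hlen, List.take_left' rfl]
  · have h1 : (pre.length : Int).toNat - a.toNat = 0 := by omega
    rw [h1, List.take_zero]
    rw [List.drop_eq_nil_iff.mpr (by simpa using by omega)]

-- the central invariant lemma: with dup holding the last index of each element of pre,
-- A's loop on the suffix equals B's loop on the suffix
theorem main_lemma (k : Int) (suf : List Int) :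
    ∀ (pre : List Int) (d : PySem.Dict Int Int),
      (∀ x, d.get? x = (lastIdx pre x).map (fun j => (j : Int))) →
      nerdyAgo k suf pre.length d = nerdyBgo (pre ++ suf) k suf pre.length := by
  induction suf with
  | nil => intro pre d _; simp [nerdyAgo, nerdyBgo]
  | cons x rest ih =>
    intro pre d hinv
    have hins : ∀ y, (d.insert x ((pre.length : Int))).get? y
        = (lastIdx (pre ++ [x]) y).map (fun j => (j : Int)) := by
      intro y
      rw [PySem.Dict.get?_insert, lastIdx_append_singleton, hinv y]
      by_cases hy : y = x <;> simp [hy]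
    have hrec : nerdyAgo k rest (pre.length + 1) (d.insert x ((pre.length : Int)))
        = nerdyBgo (pre ++ x :: rest) k rest (pre.length + 1) := by
      have h := ih (pre ++ [x]) (d.insert x ((pre.length : Int))) hins
      simpa using h
    simp only [nerdyAgo, nerdyBgo, hinv x, slice_test pre (x :: rest) k]
    cases hL : lastIdx pre x with
    | none =>
      have hnot : x ∉ pre.drop (max 0 ((pre.length : Int) - k)).toNat :=
        fun hmem => (lastIdx_none_iff pre x).mp hL (List.mem_of_mem_drop hmem)
      simp [hnot, hrec]
    | some j =>
      obtain ⟨hj, hx, hmax⟩ := lastIdx_some pre x j hL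
      by_cases hk : (pre.length : Int) - (j : Int) ≤ k
      · have hmem : x ∈ pre.drop (max 0 ((pre.length : Int) - k)).toNat :=
          (mem_drop_iff _ _ _).mpr ⟨j, by omega, hj, hx⟩
        simp [hk, hmem]
      · have hnm : x ∉ pre.drop (max 0 ((pre.length : Int) - k)).toNat := by
          intro hmem
          obtain ⟨j', hj'a, hj', hx'⟩ := (mem_drop_iff _ _ _).mp hmem
          have hle : j' ≤ j := by
            by_contra hlt
            exact hmax j' (by omega) hj' hx'
          exact hk (by omega)
        simp [hk, hnm, hrec]

-- ===== VERDICT (by name: the statement is the Claim_ definition above) =====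
theorem nerdy_run_spec : Claim_equal_nerdy_run := by
  intro path k _
  unfold Spec_nerdy_run nerdy_run nerdy_run_alt
  have h := main_lemma k path [] PySem.Dict.empty (by intro x; simp [lastIdx, PySem.Dict.get?_empty])
  simpa using h
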